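-- pv_equiv track=rewrite | github.com/AlbertoRivadulla/Advent-of-Code | 2022/21_Monkey_math/main.py | count_humn
-- ===== SOURCE A (Python) =====
-- def count_humn( monkey, monkeys, operations ):
--     if monkey == 'humn':
--         return 1
--
--     if monkeys[monkey] != None:
--         return 0
--
--     left = operations[monkey][0]
--     right = operations[monkey][2]
--
--     return count_humn( left, monkeys, operations ) + count_humn( right, monkeys, operations )
-- ===== SOURCE B (Python) =====
-- def count_humn(monkey, monkeys, operations):
--     count = 0
--     stack = [monkey]
--     while stack:
--         node = stack.pop()
--         if node == 'humn':
--             count += 1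
--         elif monkeys[node] != None:
--             continue
--         else:
--             op = operations[node]
--             stack.append(op[0])
--             stack.append(op[2])
--     return count
-- ===== Notes on version B (the rewrite author's own statement) =====
-- stated objective: alternative
-- what changed: Replaces the two-way recursion with an iterative explicit-stack worklist that accumulates the count in a single loop variable.
import Mathlib
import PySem

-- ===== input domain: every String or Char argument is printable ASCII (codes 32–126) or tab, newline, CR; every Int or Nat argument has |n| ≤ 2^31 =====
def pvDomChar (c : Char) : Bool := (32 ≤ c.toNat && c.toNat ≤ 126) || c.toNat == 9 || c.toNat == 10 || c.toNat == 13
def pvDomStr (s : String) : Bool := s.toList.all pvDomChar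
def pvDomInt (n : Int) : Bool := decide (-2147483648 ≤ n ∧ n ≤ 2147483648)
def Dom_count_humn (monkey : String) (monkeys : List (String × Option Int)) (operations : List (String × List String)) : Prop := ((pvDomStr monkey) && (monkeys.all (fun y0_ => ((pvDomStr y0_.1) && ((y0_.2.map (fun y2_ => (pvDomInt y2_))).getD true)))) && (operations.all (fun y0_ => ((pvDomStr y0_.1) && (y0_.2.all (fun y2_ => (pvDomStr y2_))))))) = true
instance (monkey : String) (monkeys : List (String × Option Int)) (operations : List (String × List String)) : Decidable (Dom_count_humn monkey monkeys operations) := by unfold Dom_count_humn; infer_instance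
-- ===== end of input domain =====

-- B replaces A's two-way recursion by an iterative explicit-stack worklist with a single accumulator (objective: alternative decomposition, same cost); equivalence is proved on exactly the inputs where A returns (Pre_ = all reachable lookups resolve and the reachable dependency graph is acyclic).


-- ===== PORT A =====
-- Python dict[k] on an association list: first match (none = KeyError, excluded by Pre_)
def dget {α : Type} (d : List (String × α)) (k : String) : Option α :=
  (d.find? (fun p => p.1 == k)).map (·.2)

-- A's unbounded recursion is ported with fuel 2*operations.length+2; on Pre_ inputs the recursion
-- depth is bounded by that fuel (proved below), and the KeyError/IndexError arms (value 0) are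
-- never reached.
def countA (monkeys : List (String × Option Int)) (operations : List (String × List String)) : Nat → String → Int
  | 0, _ => 0
  | fuel+1, monkey =>
    if monkey = "humn" then 1
    else
      match dget monkeys monkey with
      | some (some _) => 0                       -- monkeys[monkey] != None
      | some none =>
        match dget operations monkey with
        | some args =>
          -- op[0] / op[2]: literal nonnegative indices, exact as getElem? (none = IndexError, excluded)
          match args[0]?, args[2]? with
          | some left, some right =>
              countA monkeys operations fuel left + countA monkeys operations fuel right
          | _, _ => 0
        | none => 0
      | none => 0

def count_humn (monkey : String) (monkeys : List (String × Option Int)) (operations : List (String × List String)) : Int :=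
  countA monkeys operations (2 * operations.length + 2) monkey

-- ===== PORT B =====
-- one iteration of B's while loop: the popped node `node` and the remaining stack in, the new
-- stack and the count increment out; `none` = the iteration raises (KeyError/IndexError, outside Pre_)
def stepB (monkeys : List (String × Option Int)) (operations : List (String × List String))
    (node : String) (stack : List String) : Option (List String × Int) :=
  if node = "humn" then some (stack, 1)
  else
    (dget monkeys node).bind fun v =>
      match v with
      | some _ => some (stack, 0)                -- numeric leaf: `continue`
      | none =>
        (dget operations node).bind fun args =>
          args[0]?.bind fun left =>
            args[2]?.map fun right => (right :: left :: stack, 0)   -- two appends; op[2] ends on top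

-- the while loop with fuel; stack.pop() takes the top, which is the list head here
def countB (monkeys : List (String × Option Int)) (operations : List (String × List String)) : Nat → List String → Int → Int
  | 0, _, count => count
  | _+1, [], count => count
  | fuel+1, node :: rest, count =>
    match stepB monkeys operations node rest with
    | some (stack', d) => countB monkeys operations fuel stack' (count + d)
    | none => count                              -- Python raises here (outside Pre_)

def count_humn_alt (monkey : String) (monkeys : List (String × Option Int)) (operations : List (String × List String)) : Int :=
  countB monkeys operations (2 ^ (2 * operations.length + 4)) [monkey] 0

-- ===== PRECONDITION & SPEC =====
-- the nodes A recurses into from s: the two operand names of an operation node, else none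
def kids (monkeys : List (String × Option Int)) (operations : List (String × List String)) (s : String) : List String :=
  if s = "humn" then []
  else match dget monkeys s, dget operations s with
    | some none, some args => [args.getD 0 "", args.getD 2 ""]
    | _, _ => []

-- one breadth step of the dependency graph: add all children not yet present
def grow (monkeys : List (String × Option Int)) (operations : List (String × List String)) (xs : List String) : List String :=
  xs ++ ((xs.flatMap (kids monkeys operations)).filter (fun c => !(xs.contains c))).dedup

-- everything reachable from `base` (2*|operations|+2 steps saturate: at most 1+2*|operations| distinct nodes exist)
def reach (monkeys : List (String × Option Int)) (operations : List (String × List String)) (base : List String) : List String :=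
  (grow monkeys operations)^[2 * operations.length + 2] base

-- node s can be evaluated one step without raising: 'humn', a numeric leaf, or an operation with ≥ 3 tokens
def nodeOK (monkeys : List (String × Option Int)) (operations : List (String × List String)) (s : String) : Bool :=
  s == "humn" ||
    match dget monkeys s with
    | some (some _) => true
    | some none =>
        match dget operations s with
        | some args => decide (3 ≤ args.length)
        | none => false
    | none => false

-- Pre_ = exactly the inputs on which A returns: every node reachable from `monkey` resolves its
-- lookups without KeyError/IndexError, and no reachable node depends on itself (on such a cycle
-- A recurses forever).
def Pre_count_humn (monkey : String) (monkeys : List (String × Option Int)) (operations : List (String × List String)) : Prop :=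
  ((reach monkeys operations [monkey]).all (fun t =>
      nodeOK monkeys operations t &&
        !((reach monkeys operations (kids monkeys operations t)).contains t))) = true
instance (monkey : String) (monkeys : List (String × Option Int)) (operations : List (String × List String)) : Decidable (Pre_count_humn monkey monkeys operations) := by unfold Pre_count_humn; infer_instance

def pvWitness_count_humn : String × (List (String × Option Int)) × (List (String × List String)) :=
  ("root", [("root", none), ("a", some 3), ("humn", some 5)], [("root", ["a", "+", "humn"])])

def Spec_count_humn (monkey : String) (monkeys : List (String × Option Int)) (operations : List (String × List String)) (out : Int) : Prop := out = count_humn_alt monkey monkeys operations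
instance (monkey : String) (monkeys : List (String × Option Int)) (operations : List (String × List String)) (out : Int) : Decidable (Spec_count_humn monkey monkeys operations out) := by unfold Spec_count_humn; infer_instance

-- ===== CLAIM (what is proved, stated in full; the proofs are below) =====
def Claim_equal_count_humn : Prop := ∀ (monkey : String) (monkeys : List (String × Option Int)) (operations : List (String × List String)), Dom_count_humn monkey monkeys operations → Pre_count_humn monkey monkeys operations → Spec_count_humn monkey monkeys operations (count_humn monkey monkeys operations)

-- ===== LEMMAS AND PROOFS =====

lemma mem_grow {ms : List (String × Option Int)} {os : List (String × List String)} {xs : List String} {x : String} :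
    x ∈ grow ms os xs ↔ x ∈ xs ∨ ∃ t ∈ xs, x ∈ kids ms os t := by
  by_cases hx : x ∈ xs
  · simp [grow, hx]
  · simp [grow, hx, List.mem_filter, List.mem_flatMap]

lemma subset_grow {ms : List (String × Option Int)} {os : List (String × List String)} {xs : List String} {x : String}
    (h : x ∈ xs) : x ∈ grow ms os xs := mem_grow.mpr (Or.inl h)

lemma grow_mono {ms : List (String × Option Int)} {os : List (String × List String)} {X Y : List String}
    (h : ∀ x ∈ X, x ∈ Y) : ∀ x ∈ grow ms os X, x ∈ grow ms os Y := by
  intro x hx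
  rcases mem_grow.mp hx with h1 | ⟨t, ht, hk⟩
  · exact subset_grow (h x h1)
  · exact mem_grow.mpr (Or.inr ⟨t, h t ht, hk⟩)

lemma mem_iter_of_mem {ms : List (String × Option Int)} {os : List (String × List String)} :
    ∀ (n : Nat) (base : List String) (x : String), x ∈ base → x ∈ (grow ms os)^[n] base := by
  intro n
  induction n with
  | zero => intro base x h; simpa using h
  | succ n ih =>
    intro base x h
    rw [Function.iterate_succ_apply]
    exact ih _ x (subset_grow h)

lemma iter_mono {ms : List (String × Option Int)} {os : List (String × List String)} :
    ∀ (n : Nat) (X Y : List String), (∀ x ∈ X, x ∈ Y) → ∀ x ∈ (grow ms os)^[n] X, x ∈ (grow ms os)^[n] Y := by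
  intro n
  induction n with
  | zero => intro X Y h; simpa using h
  | succ n ih =>
    intro X Y h
    rw [Function.iterate_succ_apply, Function.iterate_succ_apply]
    exact ih _ _ (grow_mono h)

-- a literal fixpoint of grow is closed under kids
lemma closed_of_fix {ms : List (String × Option Int)} {os : List (String × List String)} {X : List String}
    (h : grow ms os X = X) : ∀ t ∈ X, ∀ c ∈ kids ms os t, c ∈ X := by
  intro t ht c hc
  by_contra hcX
  have : c ∈ grow ms os X := mem_grow.mpr (Or.inr ⟨t, ht, hc⟩)
  rw [h] at this
  exact hcX this

-- iteration inside a closed superset stays inside it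
lemma iter_in_closed {ms : List (String × Option Int)} {os : List (String × List String)} {Z : List String}
    (hcl : ∀ t ∈ Z, ∀ c ∈ kids ms os t, c ∈ Z) :
    ∀ (n : Nat) (base : List String), (∀ x ∈ base, x ∈ Z) → ∀ x ∈ (grow ms os)^[n] base, x ∈ Z := by
  intro n
  induction n with
  | zero => intro base h; simpa using h
  | succ n ih =>
    intro base h
    rw [Function.iterate_succ_apply]
    refine ih _ ?_
    intro x hx
    rcases mem_grow.mp hx with h1 | ⟨t, ht, hk⟩
    · exact h x h1
    · exact hcl t (h t ht) x hk

-- a non-fixed grow step strictly enlarges the set of distinct members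
lemma card_lt_of_not_fix {ms : List (String × Option Int)} {os : List (String × List String)} {X : List String}
    (h : grow ms os X ≠ X) : X.toFinset.card < (grow ms os X).toFinset.card := by
  apply Finset.card_lt_card
  constructor
  · intro x hx
    rw [List.mem_toFinset] at hx ⊢
    exact subset_grow hx
  · intro hsub
    apply h
    have hD : ((X.flatMap (kids ms os)).filter (fun c => !(X.contains c))).dedup = [] := by
      by_contra hne
      obtain ⟨d, hd⟩ := List.exists_mem_of_ne_nil _ hne
      have hdg : d ∈ grow ms os X := by
        unfold grow; exact List.mem_append_right _ hd
      have hdX : d ∈ X := by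
        have := hsub (List.mem_toFinset.mpr hdg)
        rwa [List.mem_toFinset] at this
      have := (List.mem_filter.mp (List.mem_dedup.mp hd)).2
      simp [hdX] at this
    unfold grow; rw [hD, List.append_nil]

lemma le_card_iter {ms : List (String × Option Int)} {os : List (String × List String)} {base : List String} :
    ∀ (k : Nat), (∀ j < k, grow ms os ((grow ms os)^[j] base) ≠ (grow ms os)^[j] base) →
      k ≤ ((grow ms os)^[k] base).toFinset.card := by
  intro k
  induction k with
  | zero => intro _; exact Nat.zero_le _
  | succ k ih =>
    intro h
    have h1 := ih (fun j hj => h j (by omega))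
    have h2 := card_lt_of_not_fix (h k (by omega))
    rw [Function.iterate_succ_apply']
    omega

-- with all members confined to W, 2|W|+2 iterations reach a literal fixpoint (here with the
-- instantiation |W| ≤ 2*|operations|+1)
lemma reach_fix_of_bound {ms : List (String × Option Int)} {os : List (String × List String)}
    {base W : List String}
    (hb : ∀ x ∈ base, x ∈ W)
    (hk : ∀ (t c : String), c ∈ kids ms os t → c ∈ W)
    (hcard : W.toFinset.card < 2 * os.length + 2) :
    grow ms os (reach ms os base) = reach ms os base := by
  set N := 2 * os.length + 2 with hN
  by_cases hfix : ∃ j < N, grow ms os ((grow ms os)^[j] base) = (grow ms os)^[j] base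
  · obtain ⟨j, hj, hfj⟩ := hfix
    have heq : (grow ms os)^[N] base = (grow ms os)^[j] base := by
      have : (grow ms os)^[N] base = (grow ms os)^[N - j] ((grow ms os)^[j] base) := by
        rw [← Function.iterate_add_apply]
        congr 1; omega
      rw [this, Function.iterate_fixed hfj]
    show grow ms os ((grow ms os)^[N] base) = (grow ms os)^[N] base
    rw [heq, hfj]
  · push Not at hfix
    exfalso
    have hle := le_card_iter (ms := ms) (os := os) (base := base) N hfix
    have hsub : ∀ x ∈ (grow ms os)^[N] base, x ∈ W := by
      refine iter_in_closed (fun t _ c hc => hk t c hc) N base hb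
    have : ((grow ms os)^[N] base).toFinset.card ≤ W.toFinset.card := by
      apply Finset.card_le_card
      intro x hx
      rw [List.mem_toFinset] at hx ⊢
      exact hsub x hx
    omega

-- every child of anything is one of the ≤ 2*|operations| operand names
def univ (operations : List (String × List String)) : List String :=
  operations.flatMap (fun p => [p.2.getD 0 "", p.2.getD 2 ""])

lemma kids_subset_univ {ms : List (String × Option Int)} {os : List (String × List String)} :
    ∀ (t c : String), c ∈ kids ms os t → c ∈ univ os := by
  intro t c hc
  unfold kids at hc
  split_ifs at hc with ht
  · simp at hc
  · revert hc
    cases hm : dget ms t with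
    | none => simp
    | some v =>
      cases v with
      | some n => simp
      | none =>
        cases hop : dget os t with
        | none => simp
        | some args =>
          intro hc
          have hmem : (t, args) ∈ os := by
            unfold dget at hop
            cases hfind : os.find? (fun p => p.1 == t) with
            | none => rw [hfind] at hop; simp at hop
            | some p =>
              rw [hfind] at hop
              simp at hop
              have hp := List.find?_some hfind
              have hpm := List.mem_of_find?_eq_some hfind
              obtain ⟨k, v⟩ := p
              simp at hp hop
              subst hp; subst hop; exact hpm
          simp only [univ, List.mem_flatMap]
          exact ⟨(t, args), hmem, by simpa using hc⟩

lemma reach_single_fix {ms : List (String × Option Int)} {os : List (String × List String)} (s : String) :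
    grow ms os (reach ms os [s]) = reach ms os [s] := by
  apply reach_fix_of_bound (W := s :: univ os)
  · intro x hx; simp at hx; simp [hx]
  · intro t c hc; exact List.mem_cons_of_mem _ (kids_subset_univ t c hc)
  · calc (s :: univ os).toFinset.card ≤ (s :: univ os).length := List.toFinset_card_le _
    _ = (univ os).length + 1 := by simp
    _ < 2 * os.length + 2 := by
        have : (univ os).length = 2 * os.length := by
          unfold univ
          induction os with
          | nil => simp
          | cons p t ih => simp [List.flatMap_cons]; omega
        omega

lemma self_mem_reach {ms : List (String × Option Int)} {os : List (String × List String)} (s : String) :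
    s ∈ reach ms os [s] := mem_iter_of_mem _ _ _ (by simp)

-- the measure: number of distinct nodes reachable from s
def m (ms : List (String × Option Int)) (os : List (String × List String)) (s : String) : Nat :=
  (reach ms os [s]).toFinset.card

lemma m_pos {ms : List (String × Option Int)} {os : List (String × List String)} (s : String) :
    1 ≤ m ms os s := by
  have := self_mem_reach (ms := ms) (os := os) s
  have : s ∈ (reach ms os [s]).toFinset := List.mem_toFinset.mpr this
  have := Finset.card_pos.mpr ⟨s, this⟩
  unfold m; omega

-- facts at an operation node supplied by nodeOK
lemma nodeOK_op {ms : List (String × Option Int)} {os : List (String × List String)}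
    {s : String} (hs : s ≠ "humn") (hm : dget ms s = some none)
    (hok : nodeOK ms os s = true) :
    ∃ args, dget os s = some args ∧ 3 ≤ args.length ∧
      args[0]? = some (args.getD 0 "") ∧ args[2]? = some (args.getD 2 "") ∧
      kids ms os s = [args.getD 0 "", args.getD 2 ""] := by
  simp only [nodeOK, hm] at hok
  rw [show (s == "humn") = false by simpa using hs] at hok
  cases hargs : dget os s with
  | none => rw [hargs] at hok; simp at hok
  | some args =>
    rw [hargs] at hok
    have hlen : 3 ≤ args.length := by simpa using hok
    refine ⟨args, rfl, hlen, ?_, ?_, ?_⟩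
    · rw [List.getElem?_eq_getElem (by omega), List.getD_eq_getElem _ _ (by omega)]
    · rw [List.getElem?_eq_getElem (by omega), List.getD_eq_getElem _ _ (by omega)]
    · unfold kids
      rw [if_neg hs, hm, hargs]

-- along an edge into a child the measure strictly drops (uses the acyclicity of Pre_ at s)
lemma m_lt_of_kid {ms : List (String × Option Int)} {os : List (String × List String)}
    {s c : String} (hc : c ∈ kids ms os s)
    (hacyc : (reach ms os (kids ms os s)).contains s = false) :
    m ms os c < m ms os s := by
  have hclosed := closed_of_fix (reach_single_fix (ms := ms) (os := os) s)
  have hcin : c ∈ reach ms os [s] := hclosed s (self_mem_reach s) c hc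
  have hsub1 : ∀ x ∈ reach ms os [c], x ∈ reach ms os [s] := by
    intro x hx
    exact iter_in_closed hclosed _ [c] (by intro y hy; simp at hy; subst hy; exact hcin) x hx
  have hsub2 : ∀ x ∈ reach ms os [c], x ∈ reach ms os (kids ms os s) := by
    intro x hx
    exact iter_mono _ [c] (kids ms os s) (by intro y hy; simp at hy; subst hy; exact hc) x hx
  have hsns : s ∉ reach ms os [c] := by
    intro hmem
    have := hsub2 s hmem
    simp at hacyc
    exact hacyc this
  apply Finset.card_lt_card
  constructor
  · intro x hx
    rw [List.mem_toFinset] at hx ⊢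
    exact hsub1 x hx
  · intro hsub
    apply hsns
    have := hsub (List.mem_toFinset.mpr (self_mem_reach s))
    rwa [List.mem_toFinset] at this

-- shorthand for the Pre_ facts at a node
lemma pre_at {ms : List (String × Option Int)} {os : List (String × List String)} {monkey : String}
    (hpre : Pre_count_humn monkey ms os) {t : String} (ht : t ∈ reach ms os [monkey]) :
    nodeOK ms os t = true ∧ (reach ms os (kids ms os t)).contains t = false := by
  have h := (List.all_eq_true.mp hpre) t ht
  simp only [Bool.and_eq_true, Bool.not_eq_true'] at h
  exact h

-- countA is fuel-invariant once the fuel reaches the measure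
lemma countA_stab {ms : List (String × Option Int)} {os : List (String × List String)} {monkey : String}
    (hpre : Pre_count_humn monkey ms os) :
    ∀ f g s, s ∈ reach ms os [monkey] → m ms os s ≤ f → m ms os s ≤ g →
      countA ms os f s = countA ms os g s := by
  have hRclosed := closed_of_fix (reach_single_fix (ms := ms) (os := os) monkey)
  intro f
  induction f using Nat.strong_induction_on with
  | _ f IH =>
  intro g s hsR hf hg
  have h1 := m_pos (ms := ms) (os := os) s
  obtain ⟨f', rfl⟩ : ∃ f', f = f' + 1 := ⟨f - 1, by omega⟩
  obtain ⟨g', rfl⟩ : ∃ g', g = g' + 1 := ⟨g - 1, by omega⟩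
  obtain ⟨hok, hacyc⟩ := pre_at hpre hsR
  by_cases hs : s = "humn"
  · simp [countA, hs]
  · simp only [countA, if_neg hs]
    cases hm : dget ms s with
    | none => exfalso; simp [nodeOK, hm, hs] at hok
    | some v =>
      cases v with
      | some n => rfl
      | none =>
        obtain ⟨args, hargs, hlen, h0, h2, hkids⟩ := nodeOK_op hs hm hok
        simp only [hargs, h0, h2]
        have hc0 : args.getD 0 "" ∈ kids ms os s := by rw [hkids]; simp
        have hc2 : args.getD 2 "" ∈ kids ms os s := by rw [hkids]; simp
        have hm0 := m_lt_of_kid hc0 hacyc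
        have hm2 := m_lt_of_kid hc2 hacyc
        have hin0 : args.getD 0 "" ∈ reach ms os [monkey] := hRclosed s hsR _ hc0
        have hin2 : args.getD 2 "" ∈ reach ms os [monkey] := hRclosed s hsR _ hc2
        rw [IH f' (by omega) g' _ hin0 (by omega) (by omega),
            IH f' (by omega) g' _ hin2 (by omega) (by omega)]

-- B's stack loop computes `count` plus the sum of A's counts of the stacked nodes
lemma countB_inv {ms : List (String × Option Int)} {os : List (String × List String)} {monkey : String}
    (hpre : Pre_count_humn monkey ms os) :
    ∀ f stack count, (∀ s ∈ stack, s ∈ reach ms os [monkey]) →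
      (stack.map (fun s => 2 ^ (m ms os s + 1) - 1)).sum ≤ f →
      countB ms os f stack count =
        count + (stack.map (fun s => countA ms os (m ms os s) s)).sum := by
  have hRclosed := closed_of_fix (reach_single_fix (ms := ms) (os := os) monkey)
  intro f
  induction f using Nat.strong_induction_on with
  | _ f IH =>
  intro stack count hin hfuel
  cases stack with
  | nil => cases f <;> simp [countB]
  | cons s rest =>
    have hsR := hin s (by simp)
    obtain ⟨hok, hacyc⟩ := pre_at hpre hsR
    have hone : (1:Nat) ≤ 2 ^ (m ms os s) := Nat.one_le_two_pow
    have hpows : (2:Nat) ^ (m ms os s + 1) = 2 * 2 ^ (m ms os s) := by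
      rw [pow_succ]; ring
    simp only [List.map_cons, List.sum_cons] at hfuel
    obtain ⟨f', rfl⟩ : ∃ f', f = f' + 1 := ⟨f - 1, by omega⟩
    by_cases hs : s = "humn"
    · have hstep : stepB ms os s rest = some (rest, 1) := by simp [stepB, hs]
      simp only [countB, hstep]
      rw [IH f' (by omega) rest (count + 1) (fun t ht => hin t (by simp [ht])) (by omega)]
      have hc1 : countA ms os (m ms os s) s = 1 := by
        have := m_pos (ms := ms) (os := os) s
        obtain ⟨k, hk⟩ : ∃ k, m ms os s = k + 1 := ⟨m ms os s - 1, by omega⟩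
        rw [hk]; simp [countA, hs]
      simp only [List.map_cons, List.sum_cons, hc1]
      omega
    · cases hm : dget ms s with
      | none => exfalso; simp [nodeOK, hm, hs] at hok
      | some v =>
        cases v with
        | some n =>
          have hstep : stepB ms os s rest = some (rest, 0) := by
            unfold stepB; rw [if_neg hs, hm]; rfl
          simp only [countB, hstep, add_zero]
          rw [IH f' (by omega) rest count (fun t ht => hin t (by simp [ht])) (by omega)]
          have hc0 : countA ms os (m ms os s) s = 0 := by
            have := m_pos (ms := ms) (os := os) s
            obtain ⟨k, hk⟩ : ∃ k, m ms os s = k + 1 := ⟨m ms os s - 1, by omega⟩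
            rw [hk]; simp [countA, hs, hm]
          simp only [List.map_cons, List.sum_cons, hc0]
          omega
        | none =>
          obtain ⟨args, hargs, hlen, h0, h2, hkids⟩ := nodeOK_op hs hm hok
          have hstep : stepB ms os s rest = some (args.getD 2 "" :: args.getD 0 "" :: rest, 0) := by
            unfold stepB; rw [if_neg hs, hm]; simp only [Option.bind_some]
            rw [hargs]; simp only [Option.bind_some]
            rw [h0]; simp only [Option.bind_some]
            rw [h2]; rfl
          simp only [countB, hstep, add_zero]
          have hc0 : args.getD 0 "" ∈ kids ms os s := by rw [hkids]; simp
          have hc2 : args.getD 2 "" ∈ kids ms os s := by rw [hkids]; simp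
          have hm0 := m_lt_of_kid hc0 hacyc
          have hm2 := m_lt_of_kid hc2 hacyc
          have hin0 : args.getD 0 "" ∈ reach ms os [monkey] := hRclosed s hsR _ hc0
          have hin2 : args.getD 2 "" ∈ reach ms os [monkey] := hRclosed s hsR _ hc2
          have hpl : (2:Nat) ^ (m ms os (args.getD 0 "") + 1) ≤ 2 ^ (m ms os s) :=
            Nat.pow_le_pow_right (by omega) (by omega)
          have hpr : (2:Nat) ^ (m ms os (args.getD 2 "") + 1) ≤ 2 ^ (m ms os s) :=
            Nat.pow_le_pow_right (by omega) (by omega)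
          rw [IH f' (by omega) (args.getD 2 "" :: args.getD 0 "" :: rest) count
            (by intro t ht
                simp only [List.mem_cons] at ht
                rcases ht with rfl | rfl | ht
                · exact hin2
                · exact hin0
                · exact hin t (by simp [ht]))
            (by simp only [List.map_cons, List.sum_cons]; omega)]
          have hsplit : countA ms os (m ms os s) s =
              countA ms os (m ms os (args.getD 0 "")) (args.getD 0 "") +
              countA ms os (m ms os (args.getD 2 "")) (args.getD 2 "") := by
            have hp := m_pos (ms := ms) (os := os) s
            obtain ⟨k, hk⟩ : ∃ k, m ms os s = k + 1 := ⟨m ms os s - 1, by omega⟩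
            rw [hk]
            simp only [countA, if_neg hs, hm, hargs, h0, h2]
            rw [countA_stab hpre k (m ms os (args.getD 0 "")) _ hin0 (by omega) (le_refl _),
                countA_stab hpre k (m ms os (args.getD 2 "")) _ hin2 (by omega) (le_refl _)]
          simp only [List.map_cons, List.sum_cons, hsplit]
          omega

lemma m_le {ms : List (String × Option Int)} {os : List (String × List String)} (s : String) :
    m ms os s ≤ 2 * os.length + 1 := by
  unfold m
  have hsub : ∀ x ∈ reach ms os [s], x ∈ s :: univ os := by
    refine iter_in_closed ?_ _ [s] (by intro y hy; simp at hy; simp [hy])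
    intro t _ c hc
    exact List.mem_cons_of_mem _ (kids_subset_univ t c hc)
  have h1 : (reach ms os [s]).toFinset.card ≤ (s :: univ os).toFinset.card := by
    apply Finset.card_le_card
    intro x hx
    rw [List.mem_toFinset] at hx ⊢
    exact hsub x hx
  have h2 : (s :: univ os).toFinset.card ≤ 1 + 2 * os.length := by
    calc (s :: univ os).toFinset.card ≤ (s :: univ os).length := List.toFinset_card_le _
    _ = (univ os).length + 1 := by simp
    _ = 1 + 2 * os.length := by
        have : (univ os).length = 2 * os.length := by
          unfold univ
          induction os with
          | nil => simp
          | cons p t ih => simp [List.flatMap_cons]; omega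
        omega
  omega

-- ===== VERDICT (by name: the statement is the Claim_ definition above) =====
theorem count_humn_spec : Claim_equal_count_humn := by
  intro monkey monkeys operations _ hpre
  unfold Spec_count_humn count_humn count_humn_alt
  have hmle := m_le (ms := monkeys) (os := operations) monkey
  rw [countA_stab hpre (2 * operations.length + 2) (m monkeys operations monkey) monkey
        (self_mem_reach monkey) (by omega) (le_refl _)]
  rw [countB_inv hpre (2 ^ (2 * operations.length + 4)) [monkey] 0
        (by intro t ht; simp only [List.mem_singleton] at ht; subst ht; exact self_mem_reach _)
        (by
          have h1 : (2:Nat) ^ (m monkeys operations monkey + 1) ≤ 2 ^ (2 * operations.length + 4) :=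
            Nat.pow_le_pow_right (by omega) (by omega)
          simpa using Nat.le_trans (Nat.sub_le _ 1) h1)]
  simp
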